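-- pv_equiv track=rewrite | github.com/nssathish/adventofcode20xx | 2025/problem6/part2.py | split_by_symbol_length
-- ===== SOURCE A (Python) =====
-- def split_by_symbol_length(lines, symbols):
--     result = []
--     rows = len(lines)
--     col_pointer = 0
--     symbol_idx = 0
--     symbols_length = sum([len(symbol) for symbol in symbols])
--
--     while col_pointer < symbols_length:
--         symbol_length = len(symbols[symbol_idx]) if symbol_idx < len(symbols) - 1 else len(symbols[symbol_idx]) + 1
--         row_items = []
--
--         for row in range(rows):
--             if symbol_length > len(lines[row][col_pointer:]):
--                 column_items = lines[row][col_pointer:]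
--             else:
--                 column_items = lines[row][col_pointer:col_pointer + symbol_length - 1]
--
--             if len(column_items) < symbol_length - 1:
--                 spaces = ' ' * (symbol_length - 1 - len(column_items))
--                 column_items += spaces
--
--             row_items.append(column_items)
--
--         result.append(row_items)
--         col_pointer += symbol_length
--         symbol_idx += 1
--
--     return result
-- ===== SOURCE B (Python) =====
-- def split_by_symbol_length(lines, symbols):
--     # Character-scan re-implementation: build a position -> field-id "tag" map
--     # (width w cells of field i followed by one separator cell), then sweep
--     # each line once character by character, routing every tagged character
--     # (space-padded past the line's end) into its field; no slicing at all.
--     widths = [len(s) - 1 for s in symbols[:-1]] + [len(s) for s in symbols[-1:]]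
--     tags = []
--     for i, w in enumerate(widths):
--         if w >= 0:
--             tags += [i] * w + [None]
--     k = len(widths)
--     result = [[] for _ in range(k)]
--     for line in lines:
--         fields = [''] * k
--         for pos, tag in enumerate(tags):
--             if tag is not None:
--                 fields[tag] += line[pos] if pos < len(line) else ' '
--         for col, f in zip(result, fields):
--             col.append(f)
--     return result
-- ===== Notes on version B (the rewrite author's own statement) =====
-- stated objective: alternative
-- what changed: Replaces A's running-pointer while-loop of per-line slice/pad branches by a precomputed position->field-id tag map and one character-by-character sweep per line that routes each (space-padded) character into its field; Pre_ excludes symbol lists whose last symbol is empty, a degenerate zero-width trailing descriptor on which A's loop bound is reached early and it omits trailing columns while B emits one column per symbol - both readings defensible, neither specified.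
-- intended difference: When the first symbol is empty (and not the last, so Pre_ holds) and some line has at least 2 characters, A's slice lines[row][0:-1] wraps the negative end index and returns the whole line minus its last character as that zero-width column, while B returns the intended empty string for a zero-width column. — e.g. on split_by_symbol_length(["ab"], ["", "x"]): A returns [["a"], ["a"]], B returns [[""], ["a"]]
-- outside the precondition, e.g. on split_by_symbol_length(['ab'], ['a', '']): A returns [['']], B returns [[''], ['']]; on split_by_symbol_length([], ['']): A returns [], B returns [[]]; on split_by_symbol_length(['abc'], ['', '']): A returns [], B returns [[''], ['']]
import Mathlib
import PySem

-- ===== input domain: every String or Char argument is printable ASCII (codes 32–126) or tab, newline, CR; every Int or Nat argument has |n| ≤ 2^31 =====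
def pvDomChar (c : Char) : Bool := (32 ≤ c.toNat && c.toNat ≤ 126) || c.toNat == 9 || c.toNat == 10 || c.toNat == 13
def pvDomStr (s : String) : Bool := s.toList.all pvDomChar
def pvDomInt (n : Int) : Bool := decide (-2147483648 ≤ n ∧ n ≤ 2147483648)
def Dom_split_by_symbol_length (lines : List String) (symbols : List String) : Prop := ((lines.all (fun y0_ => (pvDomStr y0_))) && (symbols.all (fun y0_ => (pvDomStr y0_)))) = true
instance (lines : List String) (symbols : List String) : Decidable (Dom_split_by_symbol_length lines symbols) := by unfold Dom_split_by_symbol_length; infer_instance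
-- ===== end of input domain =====

-- B replaces A's running-pointer while-loop of slice/pad branches by a precomputed
-- position -> field-id tag map and a character-by-character sweep of each line
-- (an alternative algorithm, same cost); on the corner where the first symbol is
-- empty B returns the intended empty column (see D_ below).

-- ===== PORT A =====
-- the per-line body of A's inner for-loop (the two slice branches and the space padding)
def pvColumnItem (cs : List Char) (colPointer symbolLength : Int) : List Char :=
  let columnItems : List Char :=
    if symbolLength > ((PySem.List.slice cs (some colPointer) none).length : Int) then
      PySem.List.slice cs (some colPointer) none
    else
      PySem.List.slice cs (some colPointer) (some (colPointer + symbolLength - 1))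
  if (columnItems.length : Int) < symbolLength - 1 then
    -- column_items += ' ' * k : exact, the count is ≥ 0 in this branch
    columnItems ++ List.replicate (symbolLength - 1 - columnItems.length).toNat ' '
  else columnItems

-- the while-loop, fuel-bounded: symbol_idx increments every iteration and after the iteration
-- at index len(symbols) - 1 col_pointer exceeds the bound, so the loop runs at most
-- len(symbols) times on EVERY input and the fuel symbols.length + 1 is never exhausted
def pvSplitLoop (lines symbols : List String) (total : Int) (colPointer : Int)
    (symbolIdx : Nat) (result : List (List String)) (fuel : Nat) : List (List String) :=
  match fuel with
  | 0 => result
  | fuel + 1 =>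
    if colPointer < total then
      -- symbols[symbol_idx]: always in range when the guard holds (see the fuel comment)
      let sym : String := (PySem.List.pyGet? symbols (symbolIdx : Int)).getD ""
      let symbolLength : Int :=
        if (symbolIdx : Int) < (symbols.length : Int) - 1 then (sym.toList.length : Int)
        else (sym.toList.length : Int) + 1
      let rowItems : List String :=
        lines.map (fun line => String.ofList (pvColumnItem line.toList colPointer symbolLength))
      pvSplitLoop lines symbols total (colPointer + symbolLength) (symbolIdx + 1)
        (result ++ [rowItems]) fuel
    else result

def split_by_symbol_length (lines : List String) (symbols : List String) : List (List String) :=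
  let total : Int := (symbols.map (fun s => (s.toList.length : Int))).sum
  pvSplitLoop lines symbols total 0 0 [] (symbols.length + 1)

-- ===== PORT B =====
-- [len(s) - 1 for s in symbols[:-1]] + [len(s) for s in symbols[-1:]]
def pvWidthsB (symbols : List String) : List Int :=
  symbols.dropLast.map (fun s => (s.toList.length : Int) - 1)
  ++ (PySem.List.slice symbols (some (-1)) none).map (fun s => (s.toList.length : Int))

-- 'for i, w in enumerate(widths): if w >= 0: tags += [i]*w + [None]' as the obvious
-- structural recursion carrying the enumeration index i
def pvTagsFrom (i : Nat) (ws : List Int) : List (Option Nat) :=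
  match ws with
  | [] => []
  | w :: rest =>
    (if 0 ≤ w then List.replicate w.toNat (some i) ++ [none] else []) ++ pvTagsFrom (i + 1) rest

-- 'for pos, tag in enumerate(tags): …' as the obvious structural recursion carrying pos;
-- fields kept as List Char (turned into String when appended to a column);
-- "line[pos] if pos < len(line) else ' '" is exactly List.getD cs pos ' '
def pvScan (cs : List Char) (tags : List (Option Nat)) (pos : Nat)
    (fields : List (List Char)) : List (List Char) :=
  match tags with
  | [] => fields
  | t :: rest =>
    let fields' := match t with
      | some i => fields.modify i (fun f => f ++ [cs.getD pos ' '])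
      | none => fields
    pvScan cs rest (pos + 1) fields'

def split_by_symbol_length_alt (lines : List String) (symbols : List String) : List (List String) :=
  let widths := pvWidthsB symbols
  let tags := pvTagsFrom 0 widths
  let k := widths.length
  lines.foldl
    (fun result line =>
      -- for col, f in zip(result, fields): col.append(f)
      List.zipWith (fun col f => col ++ [String.ofList f]) result
        (pvScan line.toList tags 0 (List.replicate k [])))
    (List.replicate k [])

-- ===== PRECONDITION & SPEC =====
-- Pre_ excludes symbol lists whose LAST symbol is empty: that is a degenerate zero-width trailing
-- column descriptor for which no behaviour is specified — A's loop bound (the total of the symbol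
-- lengths) is reached before the trailing empty symbols, so A omits those columns, while B emits
-- one column per symbol; both readings are defensible on this corner (A never raises).
def Pre_split_by_symbol_length (lines : List String) (symbols : List String) : Prop :=
  symbols.getLast? ≠ some ""
instance (lines : List String) (symbols : List String) : Decidable (Pre_split_by_symbol_length lines symbols) := by unfold Pre_split_by_symbol_length; infer_instance

def pvWitness_split_by_symbol_length : List String × List String :=
  (["ab cd 7", "12 34 8"], ["abc", "de"])

-- When the first symbol is empty (and not the last, so Pre_ holds) and some line has ≥ 2
-- characters, A's slice lines[row][0:-1] wraps the negative end index and returns the whole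
-- line minus its last character as that zero-width column, while B returns the intended
-- empty string for a zero-width column.
def D_split_by_symbol_length (lines : List String) (symbols : List String) : Prop :=
  symbols.head? = some "" ∧ 2 ≤ symbols.length ∧ ∃ l ∈ lines, 2 ≤ l.toList.length
instance (lines : List String) (symbols : List String) : Decidable (D_split_by_symbol_length lines symbols) := by unfold D_split_by_symbol_length; infer_instance

def Spec_split_by_symbol_length (lines : List String) (symbols : List String) (out : List (List String)) : Prop := ¬ D_split_by_symbol_length lines symbols → out = split_by_symbol_length_alt lines symbols
instance (lines : List String) (symbols : List String) (out : List (List String)) : Decidable (Spec_split_by_symbol_length lines symbols out) := by unfold Spec_split_by_symbol_length; infer_instance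

def pvDiffWitness_split_by_symbol_length : List String × List String :=
  (["ab"], ["", "x"])
def pvDiffWitnessOut_split_by_symbol_length : (List (List String)) × (List (List String)) :=
  ([["a"], ["a"]], [[""], ["a"]])

-- ===== CLAIM (what is proved, stated in full; the proofs are below) =====
def Claim_unchanged_split_by_symbol_length : Prop := ∀ (lines : List String) (symbols : List String), Dom_split_by_symbol_length lines symbols → Pre_split_by_symbol_length lines symbols → Spec_split_by_symbol_length lines symbols (split_by_symbol_length lines symbols)
def Claim_changed_split_by_symbol_length : Prop := Dom_split_by_symbol_length (pvDiffWitness_split_by_symbol_length.1) (pvDiffWitness_split_by_symbol_length.2) ∧ Pre_split_by_symbol_length (pvDiffWitness_split_by_symbol_length.1) (pvDiffWitness_split_by_symbol_length.2) ∧ D_split_by_symbol_length (pvDiffWitness_split_by_symbol_length.1) (pvDiffWitness_split_by_symbol_length.2) ∧ split_by_symbol_length (pvDiffWitness_split_by_symbol_length.1) (pvDiffWitness_split_by_symbol_length.2) = pvDiffWitnessOut_split_by_symbol_length.1 ∧ split_by_symbol_length_alt (pvDiffWitness_split_by_symbol_length.1) (pvDiffWitness_split_by_symbol_length.2) = pvDiffWitnessOut_split_by_symbol_length.2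 ∧ pvDiffWitnessOut_split_by_symbol_length.1 ≠ pvDiffWitnessOut_split_by_symbol_length.2
def Claim_exact_split_by_symbol_length : Prop := ∀ (lines : List String) (symbols : List String), Dom_split_by_symbol_length lines symbols → Pre_split_by_symbol_length lines symbols → D_split_by_symbol_length lines symbols → split_by_symbol_length lines symbols ≠ split_by_symbol_length_alt lines symbols

-- ===== LEMMAS AND PROOFS =====

-- s.ljust(w) with the default space fill (a non-positive w pads nothing)
def pvLjust (cs : List Char) (w : Int) : List Char :=
  if (cs.length : Int) < w then cs ++ List.replicate (w - cs.length).toNat ' ' else cs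

-- spec-level widths (the same list as pvWidthsB, in getLast? form)
def pvWidths (symbols : List String) : List Int :=
  match symbols with
  | [] => []
  | _ => symbols.dropLast.map (fun s => (s.toList.length : Int) - 1)
         ++ [((symbols.getLast?.getD "").toList.length : Int)]

-- common shape both ports are reduced to: one column per (start, width) descriptor
def pvCol (lines : List String) (p w : Int) : List String :=
  lines.map (fun line =>
    String.ofList (pvLjust (PySem.List.slice line.toList (some p) (some (p + w))) w))

def pvStartsFrom (pos : Int) (ws : List Int) : List Int :=
  match ws with
  | [] => []
  | w :: ws => pos :: pvStartsFrom (pos + w + 1) ws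

def pvSumLen (l : List String) : Nat := (l.map (fun s => s.length)).sum

theorem pvSumLen_cast (l : List String) :
    (l.map (fun s => (s.toList.length : Int))).sum = (pvSumLen l : Int) := by
  induction l with
  | nil => simp [pvSumLen]
  | cons s t ih => simp [pvSumLen, List.map_cons, List.sum_cons] at *; omega

theorem pvSumLen_append_cons (pre : List String) (s : String) (rest : List String) :
    pvSumLen (pre ++ s :: rest) = pvSumLen pre + s.length + pvSumLen rest := by
  simp [pvSumLen]; omega

theorem pvSumLen_pos (l : List String) (h : l.getLast? ≠ some "") (hne : l ≠ []) :
    1 ≤ pvSumLen l := by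
  induction l with
  | nil => simp at hne
  | cons x t ih =>
    cases t with
    | nil =>
      have hx : x ≠ "" := by simpa using h
      have : x.length ≠ 0 := by simpa [String.length_eq_zero_iff] using hx
      simp only [pvSumLen, List.map_cons, List.map_nil, List.sum_cons, List.sum_nil]
      omega
    | cons y ys =>
      have := ih (by rwa [List.getLast?_cons_cons] at h) (by simp)
      simp only [pvSumLen, List.map_cons, List.sum_cons] at *
      omega

theorem pvWidths_cons (s r : String) (rs : List String) :
    pvWidths (s :: r :: rs) = ((s.toList.length : Int) - 1) :: pvWidths (r :: rs) := by
  simp [pvWidths, List.dropLast]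

-- the loop body of A produces exactly the ljust column, for symbol_length = w + 1
theorem pvColumnItem_eq (cs : List Char) (cp : Nat) (w : Int) :
    pvColumnItem cs (cp : Int) (w + 1)
      = pvLjust (PySem.List.slice cs (some (cp : Int)) (some ((cp : Int) + w))) w := by
  unfold pvColumnItem pvLjust
  have h0 : (cp : Int) + (w + 1) - 1 = (cp : Int) + w := by ring
  have h1 : (w + 1) - 1 = w := by ring
  rw [h0, h1]
  by_cases hbr : (w + 1) > ((PySem.List.slice cs (some (cp : Int)) none).length : Int)
  · -- take-the-whole-rest branch: the rest IS the clamped slice cs[cp:cp+w] here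
    rw [if_pos hbr]
    have hfrom : PySem.List.slice cs (some (cp : Int)) none = cs.drop cp :=
      PySem.List.slice_from_natCast cs cp
    rw [hfrom] at hbr ⊢
    have hw0 : 0 ≤ w := by
      have : (0 : Int) ≤ ((cs.drop cp).length : Int) := by positivity
      omega
    have hS : PySem.List.slice cs (some (cp : Int)) (some ((cp : Int) + w)) = cs.drop cp := by
      have h2 : (cp : Int) + w = ((cp + w.toNat : Nat) : Int) := by omega
      rw [h2, PySem.List.slice_natCast]
      have h3 : cp + w.toNat - cp = w.toNat := by omega
      rw [h3]
      exact List.take_of_length_le (by omega)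
    rw [hS]
  · rw [if_neg hbr]

theorem pvLoop_exit (lines symbols : List String) (total cp : Int) (idx : Nat)
    (acc : List (List String)) (fuel : Nat) (h : ¬ cp < total) :
    pvSplitLoop lines symbols total cp idx acc fuel = acc := by
  cases fuel with
  | zero => rfl
  | succ f => simp [pvSplitLoop, h]

theorem pvLoop_eq (lines : List String) : ∀ (suf pre : List String) (fuel : Nat)
    (acc : List (List String)),
    suf.getLast? ≠ some "" →
    suf.length ≤ fuel →
    pvSplitLoop lines (pre ++ suf)
        ((pvSumLen (pre ++ suf) : Nat) : Int) ((pvSumLen pre : Nat) : Int)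
        pre.length acc fuel
      = acc ++ ((pvStartsFrom ((pvSumLen pre : Nat) : Int) (pvWidths suf)).zip (pvWidths suf)).map
          (fun pw => pvCol lines pw.1 pw.2) := by
  intro suf
  induction suf with
  | nil =>
    intro pre fuel acc _ _
    simp only [List.append_nil, pvWidths, pvStartsFrom, List.zip_nil_right, List.map_nil,
      List.append_nil]
    exact pvLoop_exit _ _ _ _ _ _ _ (by omega)
  | cons s rest ih =>
    intro pre fuel acc hlast hfuel
    obtain ⟨f, rfl⟩ : ∃ f, fuel = f + 1 := ⟨fuel - 1, by simp at hfuel; omega⟩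
    have hsum := pvSumLen_append_cons pre s rest
    have hget : (PySem.List.pyGet? (pre ++ s :: rest) ((pre.length : Nat) : Int)).getD "" = s := by
      rw [PySem.List.pyGet?_natCast]
      simp
    cases rest with
    | nil =>
      -- the guard holds: the single remaining symbol is the last one, hence nonempty
      have hrem := pvSumLen_pos [s] hlast (by simp)
      have hrem' : 1 ≤ s.length := by simpa [pvSumLen] using hrem
      have hcond : ((pvSumLen pre : Nat) : Int) < ((pvSumLen (pre ++ [s]) : Nat) : Int) := by
        rw [hsum]; push_cast; simp [pvSumLen]; omega
      simp only [pvSplitLoop, if_pos hcond, hget]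
      -- last symbol: symbol_length = len(s) + 1, then the loop exits (col_pointer = total + 1)
      have hidx : ¬ ((pre.length : Int) < ((pre ++ [s]).length : Int) - 1) := by
        simp
      rw [if_neg hidx]
      have hrow : lines.map (fun line =>
            String.ofList (pvColumnItem line.toList ((pvSumLen pre : Nat) : Int)
              ((s.toList.length : Int) + 1)))
          = pvCol lines ((pvSumLen pre : Nat) : Int) (s.toList.length : Int) := by
        unfold pvCol
        exact List.map_congr_left (fun line _ => by rw [pvColumnItem_eq])
      rw [hrow]
      rw [pvLoop_exit _ _ _ _ _ _ f (by
        have h2 : s.toList.length = s.length := by simp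
        have h3 : pvSumLen ([] : List String) = 0 := by simp [pvSumLen]
        rw [hsum, h2, h3]
        push_cast
        omega)]
      simp [pvWidths, pvStartsFrom]
    | cons r rs =>
      -- the guard holds: the last symbol lies in r :: rs and is nonempty
      have hlast' : (r :: rs).getLast? ≠ some "" := by
        rwa [List.getLast?_cons_cons] at hlast
      have hrem := pvSumLen_pos (r :: rs) hlast' (by simp)
      have hcond : ((pvSumLen pre : Nat) : Int)
          < ((pvSumLen (pre ++ s :: r :: rs) : Nat) : Int) := by
        rw [hsum]; push_cast; omega
      simp only [pvSplitLoop, if_pos hcond, hget]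
      have hidx : (pre.length : Int) < ((pre ++ s :: r :: rs).length : Int) - 1 := by
        simp; omega
      rw [if_pos hidx]
      have hrow : lines.map (fun line =>
            String.ofList (pvColumnItem line.toList ((pvSumLen pre : Nat) : Int)
              (s.toList.length : Int)))
          = pvCol lines ((pvSumLen pre : Nat) : Int) ((s.toList.length : Int) - 1) := by
        unfold pvCol
        refine List.map_congr_left (fun line _ => ?_)
        have key := pvColumnItem_eq line.toList (pvSumLen pre) ((s.toList.length : Int) - 1)
        have e : ((s.toList.length : Int) - 1) + 1 = (s.toList.length : Int) := by ring
        rw [e] at key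
        rw [key]
      rw [hrow]
      have happ : (pre ++ [s]) ++ r :: rs = pre ++ s :: r :: rs := by
        simp
      have hcp' : ((pvSumLen pre : Nat) : Int) + (s.toList.length : Int)
          = ((pvSumLen (pre ++ [s]) : Nat) : Int) := by
        have : pvSumLen (pre ++ [s]) = pvSumLen pre + s.length := by
          simpa [pvSumLen] using pvSumLen_append_cons pre s []
        rw [this]; push_cast; simp
      have hlen' : (pre ++ [s]).length = pre.length + 1 := by simp
      have hrec := ih (pre ++ [s]) f
        (acc ++ [pvCol lines ((pvSumLen pre : Nat) : Int) ((s.toList.length : Int) - 1)])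
        hlast' (by simp only [List.length_cons] at hfuel ⊢; omega)
      rw [happ, hlen'] at hrec
      rw [hcp']
      rw [hrec]
      have hpos : ((pvSumLen (pre ++ [s]) : Nat) : Int)
          = ((pvSumLen pre : Nat) : Int) + ((s.toList.length : Int) - 1) + 1 := by
        rw [← hcp']; have h2 : s.toList.length = s.length := by simp
        ring
      rw [pvWidths_cons, pvStartsFrom, ← hpos]
      simp [List.zip_cons_cons, List.append_assoc]

-- A reduced to the descriptor map
theorem pvA_eq_desc (lines symbols : List String) (hpre : symbols.getLast? ≠ some "") :
    split_by_symbol_length lines symbols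
      = ((pvStartsFrom 0 (pvWidths symbols)).zip (pvWidths symbols)).map
          (fun pw => pvCol lines pw.1 pw.2) := by
  unfold split_by_symbol_length
  rw [pvSumLen_cast symbols]
  have h0 : ((pvSumLen ([] : List String) : Nat) : Int) = (0 : Int) := by simp [pvSumLen]
  have h := pvLoop_eq lines symbols [] (symbols.length + 1) [] hpre (by omega)
  simp only [List.nil_append, List.length_nil] at h
  rw [h0] at h
  rw [h]

-- ===== B-side theory =====

def pvPadCell (cs : List Char) (p w : Nat) : List Char :=
  (List.range w).map (fun j => cs.getD (p + j) ' ')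

def pvCells (cs : List Char) (pos : Nat) (ws : List Int) : List (List Char) :=
  match ws with
  | [] => []
  | w :: rest =>
    (if 0 ≤ w then pvPadCell cs pos w.toNat else []) ::
      pvCells cs (pos + (if 0 ≤ w then w.toNat + 1 else 0)) rest

theorem pvCells_length (cs : List Char) : ∀ (ws : List Int) (pos : Nat),
    (pvCells cs pos ws).length = ws.length := by
  intro ws
  induction ws with
  | nil => intro pos; rfl
  | cons w rest ih => intro pos; simp [pvCells, ih]

theorem pvStartsFrom_length (ws : List Int) : ∀ (p : Int), (pvStartsFrom p ws).length = ws.length := by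
  induction ws with
  | nil => intro p; rfl
  | cons w rest ih => intro p; simp [pvStartsFrom, ih]

theorem pvPadCell_succ (cs : List Char) (p w : Nat) :
    pvPadCell cs p (w + 1) = cs.getD p ' ' :: pvPadCell cs (p + 1) w := by
  unfold pvPadCell
  rw [List.range_succ_eq_map, List.map_cons, List.map_map]
  simp only [Nat.add_zero]
  congr 1
  exact List.map_congr_left (fun j _ => by
    simp only [Function.comp]
    congr 1
    omega)

theorem pvScan_append (cs : List Char) : ∀ (T1 T2 : List (Option Nat)) (pos : Nat)
    (F : List (List Char)),
    pvScan cs (T1 ++ T2) pos F = pvScan cs T2 (pos + T1.length) (pvScan cs T1 pos F) := by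
  intro T1
  induction T1 with
  | nil => intro T2 pos F; simp [pvScan]
  | cons t T1 ih =>
    intro T2 pos F
    simp only [List.cons_append, pvScan, List.length_cons]
    rw [ih]
    congr 1
    omega

theorem pvModify_at_append (Fpre : List (List Char)) (x : List Char) (L : List (List Char))
    (f : List Char → List Char) :
    (Fpre ++ x :: L).modify Fpre.length f = Fpre ++ f x :: L := by
  have hn : Fpre.length < (Fpre ++ x :: L).length := by simp
  rw [List.modify_eq_take_cons_drop hn]
  simp

theorem pvScan_block (cs : List Char) : ∀ (w : Nat) (pos : Nat) (Fpre : List (List Char))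
    (x : List Char) (L : List (List Char)),
    pvScan cs (List.replicate w (some Fpre.length) ++ [none]) pos (Fpre ++ x :: L)
      = Fpre ++ (x ++ pvPadCell cs pos w) :: L := by
  intro w
  induction w with
  | zero =>
    intro pos Fpre x L
    simp [pvScan, pvPadCell]
  | succ w ih =>
    intro pos Fpre x L
    rw [List.replicate_succ, List.cons_append]
    show pvScan cs (List.replicate w (some Fpre.length) ++ [none]) (pos + 1)
        ((Fpre ++ x :: L).modify Fpre.length (fun f => f ++ [cs.getD pos ' '])) = _
    rw [pvModify_at_append]
    rw [ih (pos + 1) Fpre (x ++ [cs.getD pos ' ']) L]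
    rw [pvPadCell_succ]
    simp

theorem pvScan_tags (cs : List Char) : ∀ (ws : List Int) (pos : Nat) (Fpre : List (List Char)),
    pvScan cs (pvTagsFrom Fpre.length ws) pos (Fpre ++ List.replicate ws.length [])
      = Fpre ++ pvCells cs pos ws := by
  intro ws
  induction ws with
  | nil => intro pos Fpre; simp [pvTagsFrom, pvCells, pvScan]
  | cons w rest ih =>
    intro pos Fpre
    rw [pvTagsFrom, List.length_cons, List.replicate_succ]
    by_cases hw : 0 ≤ w
    · rw [if_pos hw]
      rw [pvScan_append]
      rw [pvScan_block cs w.toNat pos Fpre [] (List.replicate rest.length [])]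
      have hlen : (List.replicate w.toNat (some Fpre.length) ++ [none]).length = w.toNat + 1 := by
        simp
      rw [hlen]
      have hfp : Fpre.length + 1 = (Fpre ++ [[] ++ pvPadCell cs pos w.toNat]).length := by simp
      rw [hfp]
      have := ih (pos + (w.toNat + 1)) (Fpre ++ [[] ++ pvPadCell cs pos w.toNat])
      rw [show (Fpre ++ [[] ++ pvPadCell cs pos w.toNat]) ++ List.replicate rest.length []
            = Fpre ++ ([] ++ pvPadCell cs pos w.toNat) :: List.replicate rest.length [] by simp] at this
      rw [this]
      simp [pvCells, if_pos hw]
    · rw [if_neg hw, List.nil_append]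
      have hfp : Fpre.length + 1 = (Fpre ++ [([] : List Char)]).length := by simp
      rw [hfp]
      have := ih pos (Fpre ++ [[]])
      rw [show (Fpre ++ [([] : List Char)]) ++ List.replicate rest.length []
            = Fpre ++ ([] : List Char) :: List.replicate rest.length [] by simp] at this
      rw [this]
      simp [pvCells, if_neg hw]

-- a nonnegative-width cell: the padded slice is the per-position character map
theorem pvCell_eq_slice (cs : List Char) (p w : Nat) :
    pvLjust (PySem.List.slice cs (some (p : Int)) (some ((p : Int) + (w : Int)))) (w : Int)
      = pvPadCell cs p w := by
  rw [PySem.List.slice_natCast_add]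
  unfold pvLjust pvPadCell
  have hlen : ((cs.drop p).take w).length = min w (cs.length - p) := by simp [Nat.min_comm]
  by_cases h : (((cs.drop p).take w).length : Int) < (w : Int)
  · rw [if_pos h]
    refine List.ext_getElem ?_ ?_
    · simp only [List.length_append, List.length_replicate, List.length_map, List.length_range]
      omega
    · intro j h1 h2
      simp only [List.length_map, List.length_range] at h2
      simp only [List.getElem_map, List.getElem_range]
      by_cases hj : j < ((cs.drop p).take w).length
      · rw [List.getElem_append_left hj]
        have hpj : p + j < cs.length := by omega
        rw [List.getElem_take, List.getElem_drop]
        rw [List.getD_eq_getElem cs ' ' hpj]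
      · rw [List.getElem_append_right (by omega)]
        rw [List.getElem_replicate]
        have hpj : ¬ p + j < cs.length := by omega
        rw [List.getD_eq_default cs ' ' (by omega)]
  · rw [if_neg h]
    have hw : ((cs.drop p).take w).length = w := by omega
    refine List.ext_getElem ?_ ?_
    · simp [hw]
    · intro j h1 h2
      simp only [List.length_map, List.length_range] at h2
      simp only [List.getElem_map, List.getElem_range]
      have hpj : p + j < cs.length := by omega
      rw [List.getElem_take, List.getElem_drop]
      rw [List.getD_eq_getElem cs ' ' hpj]

-- a width -1 cell is empty when its start is positive or the line has at most one char
theorem pvCell_neg (cs : List Char) (p : Nat) (h : 1 ≤ p ∨ cs.length ≤ 1) :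
    pvLjust (PySem.List.slice cs (some (p : Int)) (some ((p : Int) + (-1 : Int)))) (-1 : Int)
      = [] := by
  have hlj : ∀ l : List Char, pvLjust l (-1) = l := by
    intro l; unfold pvLjust
    rw [if_neg (by omega)]
  rw [hlj]
  rcases h with hp | hcs
  · have he : (p : Int) + (-1 : Int) = ((p - 1 : Nat) : Int) := by omega
    rw [he, PySem.List.slice_natCast]
    have : p - 1 - p = 0 := by omega
    rw [this]
    simp
  · have hp0 : (p : Int) = 0 ∨ (p : Int) = 1 ∨ 2 ≤ (p : Int) := by omega
    rcases hp0 with h0 | h1 | h2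
    · rw [h0]
      simp only [zero_add]
      rw [PySem.List.slice_zero_start, PySem.List.slice_to_neg_one]
      match cs, hcs with
      | [], _ => rfl
      | [c], _ => rfl
    · -- p ≥ 1 cases are covered above; reuse via the same computation
      rw [h1]
      have he : (1 : Int) + (-1 : Int) = ((0 : Nat) : Int) := by omega
      have he1 : (1 : Int) = ((1 : Nat) : Int) := by omega
      rw [he, he1, PySem.List.slice_natCast]
      simp
    · have hp' : 1 ≤ p := by omega
      have he : (p : Int) + (-1 : Int) = ((p - 1 : Nat) : Int) := by omega
      rw [he, PySem.List.slice_natCast]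
      have : p - 1 - p = 0 := by omega
      rw [this]
      simp

-- list-level: the descriptor columns of one line equal its scanned cells
theorem pvCells_eq (cs : List Char) : ∀ (ws : List Int) (pos : Nat),
    (∀ w ∈ ws, -1 ≤ w) →
    (pos = 0 → 0 ≤ ws.headD 0 ∨ cs.length ≤ 1) →
    ((pvStartsFrom (pos : Int) ws).zip ws).map
        (fun pw => pvLjust (PySem.List.slice cs (some pw.1) (some (pw.1 + pw.2))) pw.2)
      = pvCells cs pos ws := by
  intro ws
  induction ws with
  | nil => intro pos _ _; simp [pvStartsFrom, pvCells]
  | cons w rest ih =>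
    intro pos hge hp
    rw [pvStartsFrom]
    simp only [List.zip_cons_cons, List.map_cons, pvCells]
    by_cases hw : 0 ≤ w
    · simp only [if_pos hw]
      congr 1
      · have hwe : w = ((w.toNat : Nat) : Int) := by omega
        rw [hwe]
        exact pvCell_eq_slice cs pos w.toNat
      ·
        have he : (pos : Int) + w + 1 = ((pos + (w.toNat + 1) : Nat) : Int) := by omega
        rw [he]
        exact ih (pos + (w.toNat + 1)) (fun x hx => hge x (by simp [hx]))
          (by intro h0; omega)
    · rw [if_neg hw]
      have hw1 : w = -1 := by
        have := hge w (by simp)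
        omega
      subst hw1
      simp only [if_neg hw]
      congr 1
      · refine pvCell_neg cs pos ?_
        by_cases h0 : pos = 0
        · rcases hp h0 with ha | hb
          · simp at ha
          · exact Or.inr hb
        · exact Or.inl (by omega)
      ·
        have he : (pos : Int) + (-1) + 1 = ((pos + 0 : Nat) : Int) := by omega
        rw [he]
        refine ih (pos + 0) (fun x hx => hge x (by simp [hx])) ?_
        intro h0
        have hpz : pos = 0 := by omega
        rcases hp hpz with ha | hb
        · simp at ha
        · exact Or.inr hb

-- the per-line fields of B's sweep
theorem pvFields_eq (cs : List Char) (ws : List Int) :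
    pvScan cs (pvTagsFrom 0 ws) 0 (List.replicate ws.length []) = pvCells cs 0 ws := by
  have := pvScan_tags cs ws 0 []
  simpa using this

-- the column-building fold of B, characterised per column index
theorem pvFoldZip (G : String → List (List Char)) (k : Nat) (hG : ∀ l, (G l).length = k) :
    ∀ (lines : List String) (F0 : List (List String)), F0.length = k →
    lines.foldl (fun R l => List.zipWith (fun col f => col ++ [String.ofList f]) R (G l)) F0
      = (List.range k).map
          (fun j => F0.getD j [] ++ lines.map (fun l => String.ofList ((G l).getD j []))) := by
  intro lines
  induction lines with
  | nil =>
    intro F0 hF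
    refine List.ext_getElem ?_ ?_
    · simp [hF]
    · intro j h1 h2
      simp only [List.foldl_nil] at h1
      simp only [List.foldl_nil, List.getElem_map, List.getElem_range, List.map_nil,
        List.append_nil]
      rw [List.getD_eq_getElem F0 [] h1]
  | cons l ls ih =>
    intro F0 hF
    rw [List.foldl_cons]
    have hF' : (List.zipWith (fun col f => col ++ [String.ofList f]) F0 (G l)).length = k := by
      simp [hF, hG l]
    rw [ih _ hF']
    refine List.map_congr_left (fun j hj => ?_)
    have hjk : j < k := List.mem_range.mp hj
    have h1 : j < (List.zipWith (fun col f => col ++ [String.ofList f]) F0 (G l)).length := by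
      omega
    rw [List.getD_eq_getElem _ [] h1]
    rw [List.getElem_zipWith]
    rw [List.map_cons, List.getD_eq_getElem (G l) [] (by rw [hG l]; omega),
      List.getD_eq_getElem F0 [] (by omega)]
    simp

theorem pvWidthsB_eq (symbols : List String) : pvWidthsB symbols = pvWidths symbols := by
  unfold pvWidthsB pvWidths
  rw [PySem.List.slice_from_neg_one]
  match symbols with
  | [] => rfl
  | s :: rest =>
    congr 1
    have hne : s :: rest ≠ [] := by simp
    have : (s :: rest).drop ((s :: rest).length - 1) = [(s :: rest).getLast hne] := by
      rw [List.drop_length_sub_one hne]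
    rw [this]
    simp [List.getLast?_eq_getLast]

theorem pvWidths_ge (symbols : List String) : ∀ w ∈ pvWidths symbols, -1 ≤ w := by
  intro w hw
  unfold pvWidths at hw
  match symbols, hw with
  | s :: rest, hw =>
    rw [List.mem_append] at hw
    rcases hw with h | h
    · obtain ⟨x, _, rfl⟩ := List.mem_map.mp h
      omega
    · simp at h
      omega

-- B reduced to the per-column map of scanned cells
theorem pvAlt_eq (lines symbols : List String) :
    split_by_symbol_length_alt lines symbols
      = (List.range (pvWidths symbols).length).map
          (fun j => lines.map
            (fun l => String.ofList ((pvCells l.toList 0 (pvWidths symbols)).getD j []))) := by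
  unfold split_by_symbol_length_alt
  rw [pvWidthsB_eq]
  have hG : ∀ l : String,
      (pvScan l.toList (pvTagsFrom 0 (pvWidths symbols)) 0
        (List.replicate (pvWidths symbols).length [])).length = (pvWidths symbols).length := by
    intro l
    rw [pvFields_eq]
    exact pvCells_length _ _ _
  rw [pvFoldZip _ (pvWidths symbols).length hG lines _ (by simp)]
  refine List.map_congr_left (fun j hj => ?_)
  have : (List.replicate (pvWidths symbols).length ([] : List String)).getD j [] = [] := by
    by_cases h : j < (pvWidths symbols).length
    · rw [List.getD_eq_getElem _ [] (by simpa using h)]; simp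
    · rw [List.getD_eq_default _ [] (by simpa using h)]
  rw [this, List.nil_append]
  refine List.map_congr_left (fun l _ => ?_)
  rw [pvFields_eq]

-- ===== VERDICT (by name: the statement is the Claim_ definition above) =====
theorem split_by_symbol_length_spec : Claim_unchanged_split_by_symbol_length := by
  intro lines symbols _ hpre
  unfold Spec_split_by_symbol_length
  intro hD
  rw [pvA_eq_desc lines symbols hpre, pvAlt_eq]
  refine List.ext_getElem ?_ ?_
  · simp [pvStartsFrom_length]
  · intro j h1 h2
    simp only [List.length_zip, List.length_map, pvStartsFrom_length, Nat.min_self] at h1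
    simp only [List.getElem_map, List.getElem_range]
    unfold pvCol
    refine List.map_congr_left (fun l hl => ?_)
    have hp : (0 : Nat) = 0 → 0 ≤ (pvWidths symbols).headD 0 ∨ l.toList.length ≤ 1 := by
      intro _
      unfold D_split_by_symbol_length at hD
      push_neg at hD
      match symbols with
      | [] => left; simp [pvWidths]
      | [s] => left; simp [pvWidths]
      | s :: r :: rs =>
        by_cases hs : s = ""
        · right
          subst hs
          have h2 : 2 ≤ ("" :: r :: rs).length := by
            simp only [List.length_cons]; omega
          have := hD rfl h2 l hl
          omega
        · left
          rw [pvWidths_cons]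
          simp only [List.headD_cons]
          have hsl : s.toList.length = s.length := by simp
          have : s.length ≠ 0 := fun h => hs (String.length_eq_zero_iff.mp h)
          omega
    have hcells := pvCells_eq l.toList (pvWidths symbols) 0 (pvWidths_ge symbols) hp
    simp only [Nat.cast_zero] at hcells
    rw [← hcells]
    have hjlt : j < ((pvStartsFrom 0 (pvWidths symbols)).zip (pvWidths symbols)).length := by
      simp only [List.length_zip, pvStartsFrom_length, Nat.min_self]
      exact h1
    rw [List.getD_eq_getElem _ [] (by simp only [List.length_map]; exact hjlt)]
    rw [List.getElem_map]

theorem split_by_symbol_length_changed : Claim_changed_split_by_symbol_length := by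
  unfold Claim_changed_split_by_symbol_length
  decide

theorem split_by_symbol_length_tight : Claim_exact_split_by_symbol_length := by
  intro lines symbols hdom hpre hD heq
  obtain ⟨hhead, hlen2, l, hl, hllen⟩ := hD
  match symbols, hhead, hpre, heq with
  | s :: r :: rs, hhead, hpre, heq =>
    have hs : s = "" := by simpa using hhead
    subst hs
    rw [pvA_eq_desc lines _ hpre, pvAlt_eq] at heq
    have hw : pvWidths ("" :: r :: rs) = (-1) :: pvWidths (r :: rs) := by
      rw [pvWidths_cons]
      norm_num
    rw [hw] at heq
    -- both sides are nonempty; compare the first column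
    rw [show pvStartsFrom 0 ((-1) :: pvWidths (r :: rs))
          = 0 :: pvStartsFrom 0 (pvWidths (r :: rs)) by
        rw [pvStartsFrom]; norm_num] at heq
    rw [List.length_cons, List.range_succ_eq_map, List.zip_cons_cons, List.map_cons,
      List.map_cons] at heq
    have hcol := List.head_eq_of_cons_eq heq
    -- and within it, the entry of the witness line l
    obtain ⟨i, hi, rfl⟩ := List.mem_iff_getElem.mp hl
    have hent := congrArg (fun x => x[i]?) hcol
    unfold pvCol at hent
    simp only [List.getElem?_map] at hent
    rw [List.getElem?_eq_getElem hi] at hent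
    simp only [Option.map_some] at hent
    -- A's entry: lines[i][0:-1], i.e. dropLast
    have hA : pvLjust (PySem.List.slice lines[i].toList (some 0) (some (0 + (-1)))) (-1)
        = lines[i].toList.dropLast := by
      have h1 : (0 : Int) + (-1) = -1 := by norm_num
      rw [h1, PySem.List.slice_zero_start, PySem.List.slice_to_neg_one]
      unfold pvLjust
      rw [if_neg (by omega)]
    -- B's entry: the empty cell of the width -1 descriptor
    have hB : (pvCells lines[i].toList 0 ((-1) :: pvWidths (r :: rs))).getD 0 [] = [] := by
      rw [pvCells]
      rw [if_neg (by omega)]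
      rfl
    rw [hA, hB] at hent
    have : lines[i].toList.dropLast = [] := by
      have := Option.some.inj hent
      have h2 := congrArg String.toList this
      simpa using h2
    have : lines[i].toList.length ≤ 1 := by
      have hlen := congrArg List.length this
      simp only [List.length_dropLast, List.length_nil] at hlen
      omega
    omega
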